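-- pv_equiv track=rewrite | github.com/JiuweiXingkong/openjudge | openjudge/666/2400010852.py | f
-- ===== SOURCE A (Python) =====
-- def f(m,n):
--     dp=[[0 for  _ in range(n+1)] for _ in range(m+1)]
--     for i in range(1,n+1):
--         dp[0][i]=1
--     for i in range(1,m+1):
--         for j in range(1,n+1):
--             dp[i][j]=dp[i][j-1]
--             if i>=j:
--                 dp[i][j]+=dp[i-j][j]
--     return dp[m][n]
-- ===== SOURCE B (Python) =====
-- def f(m, n):
--     # Counts partitions of m into AT MOST n parts (equinumerous, by conjugation,
--     # with partitions into parts <= n). e[i][k] = partitions of i into EXACTLY k parts: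
--     # e[i][k] = e[i-1][k-1] + e[i-k][k]  (smallest part == 1 vs subtract 1 from every part).
--     # A partition of m has at most m parts, so columns are capped at min(m, n).
--     K = min(m, n)
--     e = [[0] * (K + 1) for _ in range(m + 1)]
--     e[0][0] = 1
--     for i in range(1, m + 1):
--         for k in range(1, K + 1):
--             e[i][k] = e[i - 1][k - 1]
--             if i >= k:
--                 e[i][k] += e[i - k][k]
--     return sum(e[m])
-- ===== Notes on version B (the rewrite author's own statement) =====
-- stated objective: alternative
-- what changed: Replaces A's parts-bounded DP dp[i][j] (partitions of i into parts <= j, recurrence dp[i][j]=dp[i][j-1]+dp[i-j][j]) by the conjugate DP e[i][k] (partitions of i into EXACTLY k parts, recurrence e[i][k]=e[i-1][k-1]+e[i-k][k]) over a (m+1)x(min(m,n)+1) table, returning the row sum sum(e[m]); correct because partitions into at most n parts are equinumerous with partitions into parts <= n; B also returns 1 at (0,0) where A's never-initialised dp[0][0] yields 0.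
-- intended difference: At (m,n)=(0,0) A returns 0 because dp[0][0] is never initialised, while B returns 1 (the empty partition), the intended number of partitions of 0. — e.g. on f(0, 0): A returns 0, B returns 1
import Mathlib
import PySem

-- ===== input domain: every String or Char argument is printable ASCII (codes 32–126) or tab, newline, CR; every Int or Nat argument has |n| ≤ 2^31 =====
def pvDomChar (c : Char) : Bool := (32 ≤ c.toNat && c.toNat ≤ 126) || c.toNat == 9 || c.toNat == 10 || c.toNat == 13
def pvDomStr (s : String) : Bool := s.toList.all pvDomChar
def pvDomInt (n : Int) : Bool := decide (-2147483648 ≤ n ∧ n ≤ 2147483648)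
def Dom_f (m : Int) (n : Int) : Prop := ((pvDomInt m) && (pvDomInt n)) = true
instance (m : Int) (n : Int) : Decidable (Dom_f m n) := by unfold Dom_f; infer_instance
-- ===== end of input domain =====

-- B replaces A's parts-bounded DP by the conjugate exactly-k-parts DP
-- e[i][k]=e[i-1][k-1]+e[i-k][k], returning a row sum (objective: alternative).
-- B intentionally returns 1 at (m,n)=(0,0) where A's uninitialised dp[0][0] yields 0 (see D_f).

-- ===== PORT A =====
-- helper: the first loop 'for i in range(1,n+1): dp[0][i]=1' applied to row 0 (a fresh zero row)
def pvInitRowA (N : Nat) : List Int :=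
  (List.range' 1 N).foldl (fun r i => r.set i 1) (List.replicate (N + 1) 0)

-- helper: the inner loop 'for j in range(1,n+1): dp[i][j]=dp[i][j-1]; if i>=j: dp[i][j]+=dp[i-j][j]'
-- building row i (fresh zero row; all reads dp[i-j][j] have i-j < i, i.e. hit earlier rows in dp)
def pvRowA (dp : List (List Int)) (N i : Nat) : List Int :=
  (List.range' 1 N).foldl
    (fun row j =>
      let v := row.getD (j - 1) 0
      let v := if j ≤ i then v + ((dp.getD (i - j) []).getD j 0) else v
      row.set j v)
    (List.replicate (N + 1) 0)

def f (m : Int) (n : Int) : Int :=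
  -- Pre_f gives 0 ≤ m ∧ 0 ≤ n (Python raises IndexError otherwise), so toNat is exact here
  let M := m.toNat
  let N := n.toNat
  let dp := (List.range' 1 M).foldl (fun dp i => dp ++ [pvRowA dp N i]) [pvInitRowA N]
  (dp.getD M []).getD N 0

-- ===== PORT B =====
-- helper: the inner loop 'for k in range(1,K+1): e[i][k]=e[i-1][k-1]; if i>=k: e[i][k]+=e[i-k][k]'
-- building row i (a fresh zero row; both reads hit earlier rows of e)
def pvRowB (e : List (List Int)) (K i : Nat) : List Int :=
  (List.range' 1 K).foldl
    (fun row k =>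
      let v := (e.getD (i - 1) []).getD (k - 1) 0
      let v := if k ≤ i then v + (e.getD (i - k) []).getD k 0 else v
      row.set k v)
    (List.replicate (K + 1) 0)

def f_alt (m : Int) (n : Int) : Int :=
  -- Pre_f gives 0 ≤ m ∧ 0 ≤ n, so toNat is exact here
  let M := m.toNat
  let N := n.toNat
  let K := min M N                                            -- K = min(m, n)
  let e0 := (List.replicate (K + 1) 0).set 0 1                -- e[0][0] = 1
  let e := (List.range' 1 M).foldl (fun e i => e ++ [pvRowB e K i]) [e0]
  (e.getD M []).foldl (fun a b => a + b) 0                    -- return sum(e[m])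

-- ===== PRECONDITION & SPEC =====
-- Pre_f excludes m < 0 or n < 0, where the Python A raises IndexError.
def Pre_f (m : Int) (n : Int) : Prop := 0 ≤ m ∧ 0 ≤ n
instance (m : Int) (n : Int) : Decidable (Pre_f m n) := by unfold Pre_f; infer_instance
def pvWitness_f : Int × Int := (5, 3)

-- At (m,n)=(0,0) A returns 0 because dp[0][0] is never initialised, while B returns 1
-- (the empty partition), the intended count of partitions of 0.
def D_f (m : Int) (n : Int) : Prop := m = 0 ∧ n = 0
instance (m : Int) (n : Int) : Decidable (D_f m n) := by unfold D_f; infer_instance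
def Spec_f (m : Int) (n : Int) (out : Int) : Prop := ¬ D_f m n → out = f_alt m n
instance (m : Int) (n : Int) (out : Int) : Decidable (Spec_f m n out) := by unfold Spec_f; infer_instance
def pvDiffWitness_f : Int × Int := (0, 0)
def pvDiffWitnessOut_f : Int × Int := (0, 1)

-- ===== CLAIM (what is proved, stated in full; the proofs are below) =====
def Claim_unchanged_f : Prop := ∀ (m : Int) (n : Int), Dom_f m n → Pre_f m n → Spec_f m n (f m n)
def Claim_changed_f : Prop := Dom_f (pvDiffWitness_f.1) (pvDiffWitness_f.2) ∧ Pre_f (pvDiffWitness_f.1) (pvDiffWitness_f.2) ∧ D_f (pvDiffWitness_f.1) (pvDiffWitness_f.2) ∧ f (pvDiffWitness_f.1) (pvDiffWitness_f.2) = pvDiffWitnessOut_f.1 ∧ f_alt (pvDiffWitness_f.1) (pvDiffWitness_f.2) = pvDiffWitnessOut_f.2 ∧ pvDiffWitnessOut_f.1 ≠ pvDiffWitnessOut_f.2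
def Claim_exact_f : Prop := ∀ (m : Int) (n : Int), Dom_f m n → Pre_f m n → D_f m n → f m n ≠ f_alt m n

-- ===== LEMMAS AND PROOFS =====

-- A's table value: pA i j = dp[i][j] of the filled table (pA 0 0 = 0: never initialised).
def pA (i j : Nat) : Int :=
  if i = 0 then (if j = 0 then 0 else 1)
  else if _hj : j = 0 then 0
  else pA i (j - 1) + (if _h : j ≤ i then pA (i - j) j else 0)
termination_by (i, j)
decreasing_by
  · exact Prod.Lex.right _ (by omega)
  · exact Prod.Lex.left _ _ (by omega)

-- the intended count: qB i k = number of partitions of i into parts ≤ k (qB 0 0 = 1).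
def qB (i k : Nat) : Int :=
  if k = 0 then (if i = 0 then 1 else 0)
  else qB i (k - 1) + (if _h : k ≤ i then qB (i - k) k else 0)
termination_by (i, k)
decreasing_by
  · exact Prod.Lex.right _ (by omega)
  · exact Prod.Lex.left _ _ (by omega)

theorem pA_zero (j : Nat) : pA 0 j = if j = 0 then 0 else 1 := by rw [pA]; simp

theorem pA_pos_zero (i : Nat) (hi : i ≠ 0) : pA i 0 = 0 := by rw [pA]; simp [hi]

theorem pA_pos (i j : Nat) (hi : i ≠ 0) (hj : j ≠ 0) :
    pA i j = pA i (j - 1) + (if j ≤ i then pA (i - j) j else 0) := by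
  rw [pA]; simp [hi, hj, dite_eq_ite]

theorem qB_zero (i : Nat) : qB i 0 = if i = 0 then 1 else 0 := by rw [qB]; simp

theorem qB_pos (i k : Nat) (hk : k ≠ 0) :
    qB i k = qB i (k - 1) + (if k ≤ i then qB (i - k) k else 0) := by
  rw [qB]; simp [hk, dite_eq_ite]

-- getD/set toolkit
theorem pv_getD_set_self (l : List Int) (i : Nat) (v d : Int) (h : i < l.length) :
    (l.set i v).getD i d = v := by
  simp [List.getD_eq_getElem?_getD, h]

theorem pv_getD_set_ne (l : List Int) (i j : Nat) (v d : Int) (h : i ≠ j) :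
    (l.set i v).getD j d = l.getD j d := by
  simp [List.getD_eq_getElem?_getD, h]

theorem pv_getD_append_lt (l : List (List Int)) (row : List Int) (r : Nat) (h : r < l.length) :
    (l ++ [row]).getD r [] = l.getD r [] := by
  simp [List.getD_eq_getElem?_getD, List.getElem?_append_left h]

theorem pv_getD_append_len (l : List (List Int)) (row : List Int) :
    (l ++ [row]).getD l.length [] = row := by
  simp [List.getD_eq_getElem?_getD]

theorem pv_range'_concat (s k : Nat) : List.range' s (k + 1) = List.range' s k ++ [s + k] := by
  simpa using (List.range'_concat (s := s) (n := k) (step := 1))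

-- partial states of A's loops (definitionally equal to the port's folds)
def initAk (N k : Nat) : List Int :=
  (List.range' 1 k).foldl (fun r i => r.set i 1) (List.replicate (N + 1) 0)

def rowAk (dp : List (List Int)) (N i k : Nat) : List Int :=
  (List.range' 1 k).foldl
    (fun row j =>
      let v := row.getD (j - 1) 0
      let v := if j ≤ i then v + ((dp.getD (i - j) []).getD j 0) else v
      row.set j v)
    (List.replicate (N + 1) 0)

def dpAk (N k : Nat) : List (List Int) :=
  (List.range' 1 k).foldl (fun dp i => dp ++ [pvRowA dp N i]) [pvInitRowA N]

theorem initAk_succ (N k : Nat) : initAk N (k + 1) = (initAk N k).set (1 + k) 1 := by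
  unfold initAk; rw [pv_range'_concat, List.foldl_append]; rfl

theorem rowAk_succ (dp : List (List Int)) (N i k : Nat) :
    rowAk dp N i (k + 1) =
      (rowAk dp N i k).set (1 + k)
        (let v := (rowAk dp N i k).getD (1 + k - 1) 0
         if 1 + k ≤ i then v + ((dp.getD (i - (1 + k)) []).getD (1 + k) 0) else v) := by
  unfold rowAk; rw [pv_range'_concat, List.foldl_append]; rfl

theorem dpAk_succ (N k : Nat) : dpAk N (k + 1) = dpAk N k ++ [pvRowA (dpAk N k) N (1 + k)] := by
  unfold dpAk; rw [pv_range'_concat, List.foldl_append]; rfl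

-- L1: the init row
theorem initAk_spec (N : Nat) : ∀ k, k ≤ N →
    (initAk N k).length = N + 1 ∧
    ∀ t, (initAk N k).getD t 0 = if 1 ≤ t ∧ t ≤ k then 1 else 0 := by
  intro k
  induction k with
  | zero =>
    intro _
    refine ⟨by simp [initAk], fun t => ?_⟩
    rw [if_neg (by omega)]
    simp [initAk]
  | succ k ih =>
    intro hk
    obtain ⟨hlen, hval⟩ := ih (by omega)
    rw [initAk_succ]
    refine ⟨by simpa using hlen, fun t => ?_⟩
    by_cases ht : t = 1 + k
    · subst ht
      rw [pv_getD_set_self _ _ _ _ (by omega), if_pos (by omega)]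
    · rw [pv_getD_set_ne _ _ _ _ _ (fun h => ht h.symm), hval t]
      split_ifs <;> first | rfl | omega

-- L2: the inner loop builds row i correctly
theorem rowAk_spec (dp : List (List Int)) (N i : Nat) (hi : i ≠ 0)
    (hdp : ∀ r t, r < i → 1 ≤ t → t ≤ N → (dp.getD r []).getD t 0 = pA r t) :
    ∀ k, k ≤ N →
      (rowAk dp N i k).length = N + 1 ∧
      (∀ t, t ≤ k → (rowAk dp N i k).getD t 0 = pA i t) ∧
      (∀ t, k < t → (rowAk dp N i k).getD t 0 = 0) := by
  intro k
  induction k with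
  | zero =>
    intro _
    refine ⟨by simp [rowAk], fun t ht => ?_, fun t _ => ?_⟩
    · have : t = 0 := by omega
      subst this
      rw [pA_pos_zero i hi]
      simp [rowAk]
    · simp [rowAk]
  | succ k ih =>
    intro hk
    obtain ⟨hlen, hval, hzero⟩ := ih (by omega)
    rw [rowAk_succ]
    have hv : (let v := (rowAk dp N i k).getD (1 + k - 1) 0
        if 1 + k ≤ i then v + ((dp.getD (i - (1 + k)) []).getD (1 + k) 0) else v) = pA i (1 + k) := by
      show (if 1 + k ≤ i then (rowAk dp N i k).getD (1 + k - 1) 0 + ((dp.getD (i - (1 + k)) []).getD (1 + k) 0)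
            else (rowAk dp N i k).getD (1 + k - 1) 0) = pA i (1 + k)
      have h0 : (rowAk dp N i k).getD k 0 = pA i k := hval k le_rfl
      rw [pA_pos i (1 + k) hi (by omega), show 1 + k - 1 = k by omega, h0]
      by_cases hle : 1 + k ≤ i
      · rw [if_pos hle, if_pos hle, hdp (i - (1 + k)) (1 + k) (by omega) (by omega) (by omega)]
      · rw [if_neg hle, if_neg hle]; ring
    refine ⟨by simpa using hlen, fun t ht => ?_, fun t ht => ?_⟩
    · by_cases h : t = 1 + k
      · subst h; rw [pv_getD_set_self _ _ _ _ (by omega), hv]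
      · rw [pv_getD_set_ne _ _ _ _ _ (fun e => h e.symm)]
        exact hval t (by omega)
    · rw [pv_getD_set_ne _ _ _ _ _ (by omega)]
      exact hzero t (by omega)

-- L3: the outer loop of A
theorem dpAk_spec (M N : Nat) : ∀ k, k ≤ M →
    (dpAk N k).length = k + 1 ∧
    ∀ r t, r ≤ k → t ≤ N → ((dpAk N k).getD r []).getD t 0 = pA r t := by
  intro k
  induction k with
  | zero =>
    intro _
    refine ⟨by simp [dpAk], fun r t hr ht => ?_⟩
    have : r = 0 := by omega
    subst this
    have h0 : (dpAk N 0).getD 0 [] = initAk N N := by rfl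
    rw [h0, (initAk_spec N N le_rfl).2 t, pA_zero]
    split_ifs <;> first | rfl | omega
  | succ k ih =>
    intro hk
    obtain ⟨hlen, hval⟩ := ih (by omega)
    rw [dpAk_succ]
    refine ⟨by simp [hlen], fun r t hr ht => ?_⟩
    by_cases h : r ≤ k
    · rw [pv_getD_append_lt _ _ _ (by omega)]
      exact hval r t h ht
    · have hr' : r = k + 1 := by omega
      subst hr'
      have : (dpAk N k ++ [pvRowA (dpAk N k) N (1 + k)]).getD (k + 1) [] = pvRowA (dpAk N k) N (1 + k) := by
        have := pv_getD_append_len (dpAk N k) (pvRowA (dpAk N k) N (1 + k))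
        rwa [hlen] at this
      rw [this]
      have hrow := rowAk_spec (dpAk N k) N (1 + k) (by omega)
        (fun r' t' hr' h1 h2 => hval r' t' (by omega) h2) N le_rfl
      have : pvRowA (dpAk N k) N (1 + k) = rowAk (dpAk N k) N (1 + k) N := rfl
      rw [this, hrow.2.1 t ht, show 1 + k = k + 1 by omega]

-- L4: A computes pA
theorem f_eq_pA (m n : Int) : f m n = pA m.toNat n.toNat := by
  have h := (dpAk_spec m.toNat n.toNat m.toNat le_rfl).2 m.toNat n.toNat le_rfl le_rfl
  exact h

theorem qB_zero_left : ∀ k : Nat, qB 0 k = 1 := by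
  intro k
  induction k with
  | zero => rw [qB_zero]; simp
  | succ k ih =>
    rw [qB_pos 0 (k + 1) (by omega), if_neg (by omega), show k + 1 - 1 = k from rfl, ih]
    ring

-- eE i k = e[i][k] of B's table: partitions of i into exactly k parts.
def eE (i k : Nat) : Int :=
  if i = 0 then (if k = 0 then 1 else 0)
  else if k = 0 then 0
  else eE (i - 1) (k - 1) + (if k ≤ i then eE (i - k) k else 0)
termination_by i
decreasing_by all_goals omega

theorem eE_zero (k : Nat) : eE 0 k = if k = 0 then 1 else 0 := by rw [eE]; simp

theorem eE_k0 (i : Nat) (hi : i ≠ 0) : eE i 0 = 0 := by rw [eE]; simp [hi]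

theorem eE_pos (i k : Nat) (hi : i ≠ 0) (hk : k ≠ 0) :
    eE i k = eE (i - 1) (k - 1) + (if k ≤ i then eE (i - k) k else 0) := by
  rw [eE]; simp [hi, hk]

theorem eE_gt : ∀ i k : Nat, i < k → eE i k = 0 := by
  intro i
  induction i with
  | zero => intro k hk; rw [eE_zero, if_neg (by omega)]
  | succ i ih =>
    intro k hk
    rw [eE_pos (i + 1) k (by omega) (by omega), if_neg (by omega),
        Nat.add_sub_cancel, ih (k - 1) (by omega)]
    ring

theorem qB_small (t k : Nat) (h1 : k ≠ 0) (h2 : t < k) : qB t k = qB t (k - 1) := by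
  rw [qB_pos t k h1, if_neg (by omega)]; ring

theorem qB_ge (i : Nat) : ∀ n : Nat, i ≤ n → qB i n = qB i i := by
  intro n
  induction n with
  | zero => intro h; simp [Nat.le_zero.mp h]
  | succ n ih =>
    intro h
    by_cases he : i = n + 1
    · rw [he]
    · rw [qB_small i (n + 1) (by omega) (by omega), show n + 1 - 1 = n from rfl,
          ih (by omega)]

theorem qB_min (i n : Nat) : qB i (min i n) = qB i n := by
  by_cases h : n ≤ i
  · rw [min_eq_right h]
  · rw [min_eq_left (by omega), qB_ge i n (by omega)]

-- key identity: the exactly-k count equals A's-style bounded count shifted by k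
theorem eE_eq_qB : ∀ i k : Nat, 1 ≤ k → eE i k = if k ≤ i then qB (i - k) k else 0 := by
  intro i
  induction i using Nat.strong_induction_on with
  | _ i ih =>
    intro k hk
    by_cases hle : k ≤ i
    · have hi : i ≠ 0 := by omega
      rw [eE_pos i k hi (by omega), if_pos hle, if_pos hle]
      have h2 : eE (i - k) k = if k ≤ i - k then qB (i - k - k) k else 0 :=
        ih (i - k) (by omega) k hk
      have h1 : eE (i - 1) (k - 1) = qB (i - k) (k - 1) := by
        by_cases hk1 : k = 1
        · subst hk1
          rw [show (1:Nat) - 1 = 0 from rfl, qB_zero]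
          by_cases h0 : i - 1 = 0
          · simp [h0, eE_zero]
          · rw [if_neg h0, eE_k0 (i - 1) h0]
        · rw [ih (i - 1) (by omega) (k - 1) (by omega), if_pos (by omega),
              show i - 1 - (k - 1) = i - k by omega]
      rw [h1, h2, qB_pos (i - k) k (by omega)]
    · rw [if_neg hle, eE_gt i k (by omega)]

-- partial sums of a row
def sumTo (g : Nat → Int) : Nat → Int
  | 0 => g 0
  | k + 1 => sumTo g k + g (k + 1)

theorem sumTo_eE_eq_qB (i : Nat) : ∀ k : Nat, sumTo (eE i) k = qB i k := by
  intro k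
  induction k with
  | zero =>
    show eE i 0 = qB i 0
    rw [qB_zero]
    by_cases hi : i = 0
    · rw [hi, eE_zero]
    · rw [eE_k0 i hi, if_neg hi]
  | succ k ih =>
    show sumTo (eE i) k + eE i (k + 1) = qB i (k + 1)
    rw [ih, eE_eq_qB i (k + 1) (by omega), qB_pos i (k + 1) (by omega),
        show k + 1 - 1 = k from rfl]

-- summing a list whose entries are g 0 .. g K
theorem foldl_add_of_getD (g : Nat → Int) :
    ∀ (K : Nat) (l : List Int), l.length = K + 1 → (∀ t, t ≤ K → l.getD t 0 = g t) →
      l.foldl (fun a b => a + b) 0 = sumTo g K := by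
  have hmap : ∀ (K : Nat) (l : List Int), l.length = K + 1 → (∀ t, t ≤ K → l.getD t 0 = g t) →
      l = (List.range (K + 1)).map g := by
    intro K l hlen hval
    apply List.ext_getElem (by simp [hlen])
    intro t h1 h2
    have ht : t ≤ K := by omega
    have := hval t ht
    rw [List.getD_eq_getElem?_getD, List.getElem?_eq_getElem (by omega)] at this
    simpa using this.symm ▸ rfl
  have hsum : ∀ K : Nat, ((List.range (K + 1)).map g).foldl (fun a b => a + b) 0 = sumTo g K := by
    intro K
    induction K with
    | zero => simp [sumTo, List.range_succ]
    | succ K ih =>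
      rw [List.range_succ, List.map_append, List.foldl_append, ih]
      rfl
  intro K l hlen hval
  rw [hmap K l hlen hval, hsum K]

-- partial states of B's loops (definitionally equal to the port's folds)
def rowBk (e : List (List Int)) (K i k : Nat) : List Int :=
  (List.range' 1 k).foldl
    (fun row j =>
      let v := (e.getD (i - 1) []).getD (j - 1) 0
      let v := if j ≤ i then v + (e.getD (i - j) []).getD j 0 else v
      row.set j v)
    (List.replicate (K + 1) 0)

def tblBk (K k : Nat) : List (List Int) :=
  (List.range' 1 k).foldl (fun e i => e ++ [pvRowB e K i]) [(List.replicate (K + 1) 0).set 0 1]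

theorem rowBk_succ (e : List (List Int)) (K i k : Nat) :
    rowBk e K i (k + 1) =
      (rowBk e K i k).set (1 + k)
        (let v := (e.getD (i - 1) []).getD (1 + k - 1) 0
         if 1 + k ≤ i then v + (e.getD (i - (1 + k)) []).getD (1 + k) 0 else v) := by
  unfold rowBk; rw [pv_range'_concat, List.foldl_append]; rfl

theorem tblBk_succ (K k : Nat) : tblBk K (k + 1) = tblBk K k ++ [pvRowB (tblBk K k) K (1 + k)] := by
  unfold tblBk; rw [pv_range'_concat, List.foldl_append]; rfl

-- L5: the inner loop builds row i of B's table correctly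
theorem rowBk_spec (e : List (List Int)) (K i : Nat) (hi : i ≠ 0)
    (he : ∀ r t, r < i → t ≤ K → (e.getD r []).getD t 0 = eE r t) :
    ∀ k, k ≤ K →
      (rowBk e K i k).length = K + 1 ∧
      ∀ t, (rowBk e K i k).getD t 0 = if 1 ≤ t ∧ t ≤ k then eE i t else 0 := by
  intro k
  induction k with
  | zero =>
    intro _
    refine ⟨by simp [rowBk], fun t => ?_⟩
    rw [if_neg (by omega)]
    simp [rowBk]
  | succ k ih =>
    intro hk
    obtain ⟨hlen, hval⟩ := ih (by omega)
    rw [rowBk_succ]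
    have hv : (let v := (e.getD (i - 1) []).getD (1 + k - 1) 0
        if 1 + k ≤ i then v + (e.getD (i - (1 + k)) []).getD (1 + k) 0 else v) = eE i (1 + k) := by
      show (if 1 + k ≤ i then (e.getD (i - 1) []).getD (1 + k - 1) 0 + (e.getD (i - (1 + k)) []).getD (1 + k) 0
            else (e.getD (i - 1) []).getD (1 + k - 1) 0) = eE i (1 + k)
      rw [eE_pos i (1 + k) hi (by omega),
          show 1 + k - 1 = k from by omega,
          he (i - 1) k (by omega) (by omega)]
      by_cases hle : 1 + k ≤ i
      · rw [if_pos hle, if_pos hle, he (i - (1 + k)) (1 + k) (by omega) (by omega)]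
      · rw [if_neg hle, if_neg hle]; ring
    refine ⟨by simpa using hlen, fun t => ?_⟩
    by_cases h : t = 1 + k
    · subst h
      rw [pv_getD_set_self _ _ _ _ (by omega), hv, if_pos (by omega)]
    · rw [pv_getD_set_ne _ _ _ _ _ (fun e => h e.symm), hval t]
      split_ifs <;> first | rfl | omega

-- L6: the outer loop of B
theorem tblBk_spec (M K : Nat) : ∀ k, k ≤ M →
    (tblBk K k).length = k + 1 ∧
    ∀ r, r ≤ k → ((tblBk K k).getD r []).length = K + 1 ∧
      ∀ t, t ≤ K → ((tblBk K k).getD r []).getD t 0 = eE r t := by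
  intro k
  induction k with
  | zero =>
    intro _
    refine ⟨by simp [tblBk], fun r hr => ?_⟩
    have : r = 0 := by omega
    subst this
    have h0 : (tblBk K 0).getD 0 [] = (List.replicate (K + 1) 0).set 0 1 := rfl
    refine ⟨by rw [h0]; simp, fun t ht => ?_⟩
    rw [h0]
    by_cases h : t = 0
    · subst h
      rw [pv_getD_set_self _ _ _ _ (by simp), eE_zero, if_pos rfl]
    · rw [pv_getD_set_ne _ _ _ _ _ (fun e => h e.symm), eE_zero, if_neg h]
      simp [List.getD_eq_getElem?_getD]
  | succ k ih =>
    intro hk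
    obtain ⟨hlen, hval⟩ := ih (by omega)
    rw [tblBk_succ]
    refine ⟨by simp [hlen], fun r hr => ?_⟩
    by_cases h : r ≤ k
    · rw [pv_getD_append_lt _ _ _ (by omega)]
      exact hval r h
    · have hr' : r = k + 1 := by omega
      subst hr'
      have hgd : (tblBk K k ++ [pvRowB (tblBk K k) K (1 + k)]).getD (k + 1) [] = pvRowB (tblBk K k) K (1 + k) := by
        have := pv_getD_append_len (tblBk K k) (pvRowB (tblBk K k) K (1 + k))
        rwa [hlen] at this
      rw [hgd]
      have hrow := rowBk_spec (tblBk K k) K (1 + k) (by omega)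
        (fun r' t' hr' ht' => (hval r' (by omega)).2 t' ht') K le_rfl
      have hpr : pvRowB (tblBk K k) K (1 + k) = rowBk (tblBk K k) K (1 + k) K := rfl
      refine ⟨by rw [hpr]; exact hrow.1, fun t ht => ?_⟩
      rw [hpr, hrow.2 t]
      by_cases h0 : t = 0
      · rw [if_neg (by omega), h0, eE_k0 (k + 1) (by omega)]
      · rw [if_pos (by omega), show 1 + k = k + 1 by omega]

-- L6b: B computes qB on Pre_
theorem f_alt_eq_qB (m n : Int) :
    f_alt m n = qB m.toNat n.toNat := by
  have hrow := (tblBk_spec m.toNat (min m.toNat n.toNat) m.toNat le_rfl).2 m.toNat le_rfl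
  have hsum := foldl_add_of_getD (eE m.toNat) (min m.toNat n.toNat) _ hrow.1 hrow.2
  calc f_alt m n = sumTo (eE m.toNat) (min m.toNat n.toNat) := hsum
    _ = qB m.toNat (min m.toNat n.toNat) := sumTo_eE_eq_qB m.toNat _
    _ = qB m.toNat n.toNat := qB_min m.toNat n.toNat

-- L7: the two recurrences agree away from (0,0)
theorem pA_eq_qB : ∀ i j : Nat, ¬ (i = 0 ∧ j = 0) → pA i j = qB i j := by
  have main : ∀ s i j : Nat, i + j ≤ s → ¬ (i = 0 ∧ j = 0) → pA i j = qB i j := by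
    intro s
    induction s with
    | zero => intro i j hs h; omega
    | succ s ih =>
      intro i j hs h
      by_cases hi : i = 0
      · subst hi
        have hj : j ≠ 0 := fun e => h ⟨rfl, e⟩
        rw [pA_zero, if_neg hj, qB_zero_left]
      · by_cases hj : j = 0
        · subst hj
          rw [pA_pos_zero i hi, qB_zero, if_neg hi]
        · rw [pA_pos i j hi hj, qB_pos i j hj]
          have h1 : pA i (j - 1) = qB i (j - 1) := ih i (j - 1) (by omega) (by omega)
          have h2 : (if j ≤ i then pA (i - j) j else 0) = (if j ≤ i then qB (i - j) j else 0) := by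
            split_ifs with hle
            · exact ih (i - j) j (by omega) (by omega)
            · rfl
          rw [h1, h2]
  intro i j h
  exact main (i + j) i j le_rfl h

-- ===== VERDICT (by name: the statement is the Claim_ definition above) =====
theorem f_spec : Claim_unchanged_f := by
  intro m n _ hpre hnd
  have hm := hpre.1; have hn := hpre.2
  rw [f_eq_pA, f_alt_eq_qB m n]
  apply pA_eq_qB
  intro ⟨h1, h2⟩
  exact hnd ⟨by omega, by omega⟩

theorem f_changed : Claim_changed_f := by unfold Claim_changed_f; decide

theorem f_tight : Claim_exact_f := by
  intro m n _ _ hd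
  obtain ⟨rfl, rfl⟩ := hd
  decide
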